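-- pv_equiv track=rewrite | github.com/jangmooByun/youtube-crawling | scripts/merge_sources_to_dated.py | pick_best_per_profile
-- ===== SOURCE A (Python) =====
-- def norm_url(x: str) -> str:
--     return (x or "").strip().rstrip("/").lower()
--
-- def _int_or(x, default=0):
--     if x is None or x == "":
--         return default
--     try:
--         return int(x)
--     except (ValueError, TypeError):
--         return default
--
-- def pick_best_per_profile(rows: list[dict]) -> list[dict]:
--     """One row per profile_url, using export.py's priority ordering."""
--     groups: dict[str, list[tuple[int, dict]]] = {}
--     for i, r in enumerate(rows):
--         u = norm_url(r.get("profile_url", ""))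
--         if not u:
--             continue
--         groups.setdefault(u, []).append((i, r))
--
--     best = []
--     for u, items in groups.items():
--         items.sort(key=lambda t: (
--             _int_or(t[1].get("is_role_based"), 1),     # ASC (0 first)
--             -_int_or(t[1].get("has_mx"), 0),            # DESC (1 first)
--             -_int_or(t[1].get("syntax_valid"), 0),      # DESC (1 first)
--             t[0],                                        # original order ASC
--         ))
--         best.append(items[0][1])
--     return best
-- ===== SOURCE B (Python) =====
-- def norm_url(x: str) -> str:
--     return (x or "").strip().rstrip("/").lower()
--
-- def _int_or(x, default=0):
--     if x is None or x == "":
--         return default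
--     try:
--         return int(x)
--     except (ValueError, TypeError):
--         return default
--
-- def pick_best_per_profile(rows: list[dict]) -> list[dict]:
--     """One row per profile_url: single pass keeping the minimum-priority row per group."""
--     best: dict[str, tuple[tuple, dict]] = {}
--     for i, r in enumerate(rows):
--         u = norm_url(r.get("profile_url", ""))
--         if not u:
--             continue
--         k = (_int_or(r.get("is_role_based"), 1),
--              -_int_or(r.get("has_mx"), 0),
--              -_int_or(r.get("syntax_valid"), 0),
--              i)
--         cur = best.get(u)
--         if cur is None or k < cur[0]:
--             best[u] = (k, r)
--     return [v[1] for v in best.values()]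
-- ===== Notes on version B (the rewrite author's own statement) =====
-- stated objective: alternative
-- what changed: Instead of grouping all rows per profile URL into lists and sorting each group by the priority key, B makes a single pass keeping only the current best (minimal-key) row per URL in a dict.
import Mathlib
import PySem

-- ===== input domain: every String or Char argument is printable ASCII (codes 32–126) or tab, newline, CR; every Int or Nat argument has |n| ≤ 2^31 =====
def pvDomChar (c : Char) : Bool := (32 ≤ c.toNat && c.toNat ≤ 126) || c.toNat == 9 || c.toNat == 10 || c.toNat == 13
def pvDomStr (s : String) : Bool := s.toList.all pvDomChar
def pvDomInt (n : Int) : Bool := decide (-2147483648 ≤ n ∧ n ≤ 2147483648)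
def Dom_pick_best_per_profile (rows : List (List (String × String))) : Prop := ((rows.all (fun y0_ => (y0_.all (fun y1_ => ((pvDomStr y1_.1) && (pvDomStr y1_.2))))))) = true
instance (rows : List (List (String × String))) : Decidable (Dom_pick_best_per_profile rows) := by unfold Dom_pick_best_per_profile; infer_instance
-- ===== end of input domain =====

-- B replaces A's sort-each-group-then-take-head by a single pass that keeps, per
-- profile URL, the row with the minimal priority key (alternative single-pass strategy).

-- ===== PORT A =====
-- shared same-module helpers (both Python versions contain these verbatim)

-- r.get(k): dict lookup = first match in the association list
def pvGet (r : List (String × String)) (k : String) : Option String :=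
  (r.find? (fun p => p.1 == k)).map (·.2)

-- norm_url: (x or "").strip().rstrip("/").lower(); 'x or ""' is x for strings;
-- .rstrip("/") (drop all trailing '/') is ported by hand (exact): reverse, dropWhile '/', reverse
def norm_url (x : String) : String :=
  PySem.Str.lower (String.ofList (((PySem.Str.strip x).toList.reverse.dropWhile (· == '/')).reverse))

-- _int_or(x, default): x is None or "" → default; int(x) with ValueError → default
def _int_or (x : Option String) (default : Int) : Int :=
  match x with
  | none => default
  | some s => if s = "" then default else (PySem.Int.ofStr? s).getD default

-- Python tuple key (lexicographic comparison = Lex product order)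
def pvKeyOf (i : Int) (r : List (String × String)) :
    Lex (Lex (Int × Int) × Lex (Int × Int)) :=
  toLex (toLex (_int_or (pvGet r "is_role_based") 1, -(_int_or (pvGet r "has_mx") 0)),
    toLex (-(_int_or (pvGet r "syntax_valid") 0), i))

def pick_best_per_profile (rows : List (List (String × String))) : List (List (String × String)) :=
  -- groups: dict url → list of (i, r); setdefault(u, []).append((i, r)) = modify with [] default
  let groups : PySem.Dict String (List (Int × List (String × String))) :=
    (PySem.List.enumerate rows 0).foldl
      (fun d p =>
        let u := norm_url ((pvGet p.2 "profile_url").getD "")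
        if u = "" then d else d.modify u [] (· ++ [p]))
      PySem.Dict.empty
  -- for u, items in groups.items(): items.sort(key=…); best.append(items[0][1])
  -- (items is never empty, so the headD default is unreachable — Python would raise there)
  groups.items.foldl
    (fun best it =>
      best ++ [((PySem.List.sorted it.2 (fun t => pvKeyOf t.1 t.2) false).headD (0, [])).2])
    []

-- ===== PORT B =====
-- loop body of B's single pass (named helper; same code as the Python loop body)
def pvBStep (d : PySem.Dict String (Lex (Lex (Int × Int) × Lex (Int × Int)) × List (String × String)))
    (p : Int × List (String × String)) :
    PySem.Dict String (Lex (Lex (Int × Int) × Lex (Int × Int)) × List (String × String)) :=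
  let u := norm_url ((pvGet p.2 "profile_url").getD "")
  if u = "" then d
  else
    let k := pvKeyOf p.1 p.2
    match d.get? u with
    | none => d.insert u (k, p.2)
    | some cur => if k < cur.1 then d.insert u (k, p.2) else d

def pick_best_per_profile_alt (rows : List (List (String × String))) : List (List (String × String)) :=
  let best := (PySem.List.enumerate rows 0).foldl pvBStep PySem.Dict.empty
  best.values.map (·.2)

-- ===== PRECONDITION & SPEC =====
def Spec_pick_best_per_profile (rows : List (List (String × String))) (out : List (List (String × String))) : Prop := out = pick_best_per_profile_alt rows
instance (rows : List (List (String × String))) (out : List (List (String × String))) : Decidable (Spec_pick_best_per_profile rows out) := by unfold Spec_pick_best_per_profile; infer_instance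

-- ===== CLAIM (what is proved, stated in full; the proofs are below) =====
def Claim_equal_pick_best_per_profile : Prop := ∀ (rows : List (List (String × String))), Dom_pick_best_per_profile rows → Spec_pick_best_per_profile rows (pick_best_per_profile rows)

-- ===== LEMMAS AND PROOFS =====

-- abbreviations for the proofs
def pvU (p : Int × List (String × String)) : String :=
  norm_url ((pvGet p.2 "profile_url").getD "")

def pvKeyP (p : Int × List (String × String)) : Lex (Lex (Int × Int) × Lex (Int × Int)) :=
  pvKeyOf p.1 p.2

-- min-tracking fold on one group's items (what B's dict entry for a url amounts to)
def pvMinFold (acc : Option (Lex (Lex (Int × Int) × Lex (Int × Int)) × List (String × String)))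
    (l : List (Int × List (String × String))) :
    Option (Lex (Lex (Int × Int) × Lex (Int × Int)) × List (String × String)) :=
  l.foldl
    (fun acc p =>
      match acc with
      | none => some (pvKeyP p, p.2)
      | some cur => if pvKeyP p < cur.1 then some (pvKeyP p, p.2) else acc)
    acc

-- a conditional-skip fold is the fold over the filtered list
theorem pv_foldl_skip {α σ : Type} (f : σ → α → σ) (c : α → Prop) [DecidablePred c] :
    ∀ (l : List α) (d : σ),
      l.foldl (fun d x => if c x then d else f d x) d
        = (l.filter (fun x => !decide (c x))).foldl f d := by
  intro l
  induction l with
  | nil => intro d; rfl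
  | cons p l ih =>
    intro d
    by_cases h : c p <;> simp [h, ih]

-- a fold whose step ignores the skipped elements is the fold over the filtered list
theorem pv_foldl_skip_self {α σ : Type} (f : σ → α → σ) (c : α → Prop) [DecidablePred c]
    (hf : ∀ d x, c x → f d x = d) :
    ∀ (l : List α) (d : σ), l.foldl f d = (l.filter (fun x => !decide (c x))).foldl f d := by
  intro l
  induction l with
  | nil => intro d; rfl
  | cons p l ih =>
    intro d
    by_cases h : c p
    · simp [h, ih, hf d p h]
    · simp [h, ih]

-- B's dict after the pass: same key list as A's group dict
theorem pv_bkeys : ∀ (l : List (Int × List (String × String)))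
    (d : PySem.Dict String (Lex (Lex (Int × Int) × Lex (Int × Int)) × List (String × String)))
    (hne : ∀ p ∈ l, pvU p ≠ ""),
    (l.foldl pvBStep d).keys = PySem.Set.update d.keys (l.map pvU) := by
  intro l
  induction l with
  | nil => intro d _; simp [PySem.Set.update_nil]
  | cons p l ih =>
    intro d hne
    have hu : pvU p ≠ "" := hne p (by simp)
    have hstep : pvBStep d p = (match d.get? (pvU p) with
        | none => d.insert (pvU p) (pvKeyP p, p.2)
        | some cur => if pvKeyP p < cur.1 then d.insert (pvU p) (pvKeyP p, p.2) else d) := by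
      simp only [pvBStep, pvKeyP]
      rw [show norm_url ((pvGet p.2 "profile_url").getD "") = pvU p from rfl, if_neg hu]
    have hkeys : (pvBStep d p).keys = PySem.Set.add d.keys (pvU p) := by
      rcases hg : d.get? (pvU p) with _ | cur
      all_goals rw [hstep, hg]
      · have hc : d.contains (pvU p) = false :=
          (PySem.Dict.get?_eq_none_iff_contains d (pvU p)).mp hg
        have hnm : pvU p ∉ d.keys := by
          intro hm
          rw [(PySem.Dict.contains_iff_mem_keys d (pvU p)).mpr hm] at hc
          exact Bool.noConfusion hc
        simp [PySem.Dict.keys_insert_of_not_contains _ _ hc, PySem.Set.add_of_not_mem hnm]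
      · have hc : d.contains (pvU p) = true := by
          rw [PySem.Dict.contains_eq_isSome_get?, hg]; rfl
        have hm : pvU p ∈ d.keys := (PySem.Dict.contains_iff_mem_keys d (pvU p)).mp hc
        by_cases hlt : pvKeyP p < cur.1 <;>
          simp [hlt, PySem.Dict.keys_insert_of_contains _ _ hc, PySem.Set.add_of_mem hm]
    rw [List.foldl_cons, ih _ (fun q hq => hne q (by simp [hq])), hkeys,
      List.map_cons, PySem.Set.update_cons]

-- B's dict entry at u is the min-fold over the u-group
theorem pv_bget : ∀ (l : List (Int × List (String × String)))
    (d : PySem.Dict String (Lex (Lex (Int × Int) × Lex (Int × Int)) × List (String × String)))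
    (u : String)
    (hne : ∀ p ∈ l, pvU p ≠ ""),
    (l.foldl pvBStep d).get? u = pvMinFold (d.get? u) (l.filter (fun p => pvU p == u)) := by
  intro l
  induction l with
  | nil => intro d u _; rfl
  | cons p l ih =>
    intro d u hne
    have hu : pvU p ≠ "" := hne p (by simp)
    have hstep : pvBStep d p = (match d.get? (pvU p) with
        | none => d.insert (pvU p) (pvKeyP p, p.2)
        | some cur => if pvKeyP p < cur.1 then d.insert (pvU p) (pvKeyP p, p.2) else d) := by
      simp only [pvBStep, pvKeyP]
      rw [show norm_url ((pvGet p.2 "profile_url").getD "") = pvU p from rfl, if_neg hu]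
    rw [List.foldl_cons, ih _ _ (fun q hq => hne q (by simp [hq]))]
    by_cases heq : pvU p = u
    · subst heq
      rcases hdg : d.get? (pvU p) with _ | cur
      · have hg : (pvBStep d p).get? (pvU p) = some (pvKeyP p, p.2) := by
          rw [hstep, hdg]; exact PySem.Dict.get?_insert_self d _ _
        rw [hg]
        simp [pvMinFold]
      · by_cases hlt : pvKeyP p < cur.1
        · have hg : (pvBStep d p).get? (pvU p) = some (pvKeyP p, p.2) := by
            rw [hstep, hdg]; simp [hlt, PySem.Dict.get?_insert_self]
          rw [hg]
          simp [pvMinFold, hlt]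
        · have hg : (pvBStep d p).get? (pvU p) = some cur := by
            rw [hstep, hdg]; simp [hlt, hdg]
          rw [hg]
          simp [pvMinFold, hlt]
    · have hg : (pvBStep d p).get? u = d.get? u := by
        rcases hdg : d.get? (pvU p) with _ | cur
        all_goals rw [hstep, hdg]
        · exact PySem.Dict.get?_insert_of_ne d _ (fun h => heq h.symm)
        · by_cases hlt : pvKeyP p < cur.1 <;>
            simp [hlt, PySem.Dict.get?_insert_of_ne d _ (fun h => heq h.symm)]
      rw [hg]
      have : (pvU p == u) = false := by simp [heq]
      simp [this]

-- the min-fold's result: it is the entry of some member with a minimal key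
theorem pv_minfold_spec : ∀ (l : List (Int × List (String × String)))
    (x : Lex (Lex (Int × Int) × Lex (Int × Int)) × List (String × String)),
    ∃ m, pvMinFold (some x) l = some m
      ∧ (m = x ∨ ∃ p ∈ l, m = (pvKeyP p, p.2))
      ∧ m.1 ≤ x.1 ∧ ∀ p ∈ l, m.1 ≤ pvKeyP p := by
  intro l
  induction l with
  | nil =>
    intro x
    exact ⟨x, rfl, Or.inl rfl, le_refl _, by simp⟩
  | cons p l ih =>
    intro x
    by_cases hlt : pvKeyP p < x.1
    · obtain ⟨m, hm, hsrc, hle, hall⟩ := ih (pvKeyP p, p.2)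
      refine ⟨m, ?_, ?_, ?_, ?_⟩
      · simpa [pvMinFold, hlt] using hm
      · rcases hsrc with h | ⟨q, hq, h⟩
        · exact Or.inr ⟨p, by simp, h⟩
        · exact Or.inr ⟨q, by simp [hq], h⟩
      · exact le_trans hle (le_of_lt hlt)
      · intro q hq
        rcases List.mem_cons.mp hq with h | h
        · subst h; exact hle
        · exact hall q h
    · obtain ⟨m, hm, hsrc, hle, hall⟩ := ih x
      refine ⟨m, ?_, ?_, hle, ?_⟩
      · simpa [pvMinFold, hlt] using hm
      · rcases hsrc with h | ⟨q, hq, h⟩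
        · exact Or.inl h
        · exact Or.inr ⟨q, by simp [hq], h⟩
      · intro q hq
        rcases List.mem_cons.mp hq with h | h
        · subst h; exact le_trans hle (le_of_not_gt hlt)
        · exact hall q h

-- two members of an index-strictly-increasing list with equal keys are equal
theorem pv_eq_of_key_eq {l : List (Int × List (String × String))}
    (hp : l.Pairwise (fun p q => p.1 < q.1))
    {m q : Int × List (String × String)} (hm : m ∈ l) (hq : q ∈ l)
    (h : pvKeyP m = pvKeyP q) : m = q := by
  have hfst : m.1 = q.1 := by
    simp only [pvKeyP, pvKeyOf, toLex_inj, Prod.mk.injEq] at h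
    exact h.2.2
  have hnd : (l.map Prod.fst).Nodup :=
    (List.pairwise_map.mpr hp).imp (fun h => ne_of_lt h)
  exact List.inj_on_of_nodup_map hnd hm hq hfst

-- one group: head of the stable sort = min-fold result (rows component)
theorem pv_group_agree (g : List (Int × List (String × String))) (hg : g ≠ [])
    (hp : g.Pairwise (fun p q => p.1 < q.1)) :
    ((PySem.List.sorted g (fun t => pvKeyOf t.1 t.2) false).headD (0, [])).2
      = ((pvMinFold none g).getD (pvKeyOf 0 [], [])).2 := by
  obtain ⟨p0, rest, rfl⟩ := List.exists_cons_of_ne_nil hg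
  have hsne : PySem.List.sorted (p0 :: rest) (fun t => pvKeyOf t.1 t.2) false ≠ [] := by
    intro h
    have hlen := PySem.List.length_sorted (p0 :: rest) (fun t => pvKeyOf t.1 t.2) false
    rw [h] at hlen
    simp at hlen
  obtain ⟨m, t, hs⟩ := List.exists_cons_of_ne_nil hsne
  have hmem : m ∈ p0 :: rest := by
    rw [← PySem.List.mem_sorted (p0 :: rest) (fun t => pvKeyOf t.1 t.2) false, hs]
    simp
  have hmin : ∀ y ∈ p0 :: rest, pvKeyP m ≤ pvKeyP y := by
    intro y hy
    exact PySem.List.key_head_sorted_le _ _ hs y hy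
  obtain ⟨b, hb, hsrc, hle, hall⟩ := pv_minfold_spec rest (pvKeyP p0, p0.2)
  have hfold : pvMinFold none (p0 :: rest) = some b := hb
  obtain ⟨q, hq, hbq⟩ : ∃ q ∈ p0 :: rest, b = (pvKeyP q, q.2) := by
    rcases hsrc with h | ⟨q, hq, h⟩
    · exact ⟨p0, by simp, h⟩
    · exact ⟨q, by simp [hq], h⟩
  have hkeq : pvKeyP q = pvKeyP m := by
    have h1 : pvKeyP m ≤ pvKeyP q := hmin q hq
    have h2 : pvKeyP q ≤ pvKeyP m := by
      have hb1 : b.1 ≤ pvKeyP m := by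
        rcases List.mem_cons.mp hmem with h | h
        · subst h; exact hle
        · exact hall m h
      rw [hbq] at hb1
      exact hb1
    exact le_antisymm h2 h1
  have hqm : q = m := pv_eq_of_key_eq hp hq hmem hkeq
  rw [hs, hfold, hbq, hqm]
  rfl

-- the two programs compute the same list
theorem pv_main (rows : List (List (String × String))) :
    pick_best_per_profile rows = pick_best_per_profile_alt rows := by
  show ((PySem.List.enumerate rows 0).foldl
      (fun d p => if pvU p = "" then d else d.modify (pvU p) [] (· ++ [p]))
      PySem.Dict.empty).items.foldl
      (fun best it =>
        best ++ [((PySem.List.sorted it.2 (fun t => pvKeyOf t.1 t.2) false).headD (0, [])).2]) []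
    = ((PySem.List.enumerate rows 0).foldl pvBStep PySem.Dict.empty).values.map (·.2)
  have hAskip : (PySem.List.enumerate rows 0).foldl
      (fun d p => if pvU p = "" then d else d.modify (pvU p) [] (· ++ [p])) PySem.Dict.empty
    = ((PySem.List.enumerate rows 0).filter (fun p => !decide (pvU p = ""))).foldl
        (fun d p => d.modify (pvU p) [] (· ++ [p])) PySem.Dict.empty :=
    pv_foldl_skip _ _ _ _
  rw [hAskip]
  have hBskip : (PySem.List.enumerate rows 0).foldl pvBStep PySem.Dict.empty
      = ((PySem.List.enumerate rows 0).filter (fun p => !decide (pvU p = ""))).foldl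
          pvBStep PySem.Dict.empty := by
    refine pv_foldl_skip_self pvBStep (fun p => pvU p = "") ?_ _ _
    intro d p h
    simp only [pvBStep]
    rw [if_pos (show norm_url ((pvGet p.2 "profile_url").getD "") = "" from h)]
  rw [hBskip]
  have hLp : ((PySem.List.enumerate rows 0).filter
      (fun p => !decide (pvU p = ""))).Pairwise (fun p q => p.1 < q.1) :=
    (PySem.List.pairwise_lt_enumerate rows 0).filter _
  have hLne : ∀ p ∈ (PySem.List.enumerate rows 0).filter (fun p => !decide (pvU p = "")),
      pvU p ≠ "" := by
    intro p hp
    have := List.of_mem_filter hp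
    simpa using this
  set L := (PySem.List.enumerate rows 0).filter (fun p => !decide (pvU p = "")) with hLdef
  -- A's group dict, analysed
  have hmap : L.foldl (fun d p => d.modify (pvU p) [] (· ++ [p])) PySem.Dict.empty
      = (L.map (fun p => (pvU p, p))).foldl
          (fun d q => d.modify q.1 [] (fun x => x ++ [q.2])) PySem.Dict.empty := by
    rw [List.foldl_map]
  have hkeysA : (L.foldl (fun d p => d.modify (pvU p) [] (· ++ [p])) PySem.Dict.empty).keys
      = PySem.Set.update PySem.Dict.empty.keys (L.map pvU) :=
    PySem.Dict.keys_foldl_modify_key L pvU [] (fun _ p => (· ++ [p])) PySem.Dict.empty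
  have hnodupA : (L.foldl (fun d p => d.modify (pvU p) [] (· ++ [p])) PySem.Dict.empty).keys.Nodup := by
    rw [hkeysA]
    exact PySem.Set.nodup_update _ _ (by simp [PySem.Dict.keys_empty])
  have hgetA : ∀ u, (L.foldl (fun d p => d.modify (pvU p) [] (· ++ [p])) PySem.Dict.empty).getD u []
      = L.filter (fun p => pvU p == u) := by
    intro u
    rw [hmap, PySem.Dict.getD_foldl_modify_append, PySem.Dict.getD_empty]
    simp [List.filter_map, List.map_map, Function.comp_def]
  -- B's dict, analysed
  have hkeysB : (L.foldl pvBStep PySem.Dict.empty).keys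
      = PySem.Set.update PySem.Dict.empty.keys (L.map pvU) :=
    pv_bkeys L PySem.Dict.empty hLne
  have hnodupB : (L.foldl pvBStep PySem.Dict.empty).keys.Nodup := by
    rw [hkeysB]
    exact PySem.Set.nodup_update _ _ (by simp [PySem.Dict.keys_empty])
  have hgetB : ∀ u, (L.foldl pvBStep PySem.Dict.empty).getD u (pvKeyOf 0 [], [])
      = (pvMinFold none (L.filter (fun p => pvU p == u))).getD (pvKeyOf 0 [], []) := by
    intro u
    rw [PySem.Dict.getD_eq_get?_getD, pv_bget L PySem.Dict.empty u hLne, PySem.Dict.get?_empty]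
  -- assemble both sides as maps over the same key list
  rw [PySem.List.foldl_append_singleton_eq_map, List.nil_append,
    PySem.Dict.items_eq_map_keys _ hnodupA [], List.map_map,
    PySem.Dict.values_eq_map_keys _ hnodupB (pvKeyOf 0 [], []), List.map_map,
    hkeysA, hkeysB]
  apply List.map_congr_left
  intro u hu
  have hu' : u ∈ L.map pvU := by
    have := (PySem.Set.mem_update _ _ u).mp hu
    simpa [PySem.Dict.keys_empty] using this
  obtain ⟨p, hpL, hpu⟩ := List.mem_map.mp hu'
  have hgne : L.filter (fun q => pvU q == u) ≠ [] :=
    List.ne_nil_of_mem (List.mem_filter.mpr ⟨hpL, by simp [hpu]⟩)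
  have hgp : (L.filter (fun q => pvU q == u)).Pairwise (fun p q => p.1 < q.1) := hLp.filter _
  simp only [Function.comp]
  rw [hgetA u, hgetB u]
  exact pv_group_agree _ hgne hgp

theorem pick_best_per_profile_spec : Claim_equal_pick_best_per_profile := by
  intro rows _
  exact pv_main rows
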